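-- pv_equiv track=rewrite | github.com/CarlosCCQ/Ejercicio-2-CC3S2 | count_words.py | count
-- ===== SOURCE A (Python) =====
-- def count(s: str) -> int:
--     words = 0
--     last = ' '
--
--     for char in s:
--         if not char.isalpha() and (last.lower() == 's' or last.lower() == 'r'):
--             words += 1
--         last = char
--
--     if last.lower() == 'r' or last.lower() == 's':
--         words += 1
--
--     return words
-- ===== SOURCE B (Python) =====
-- def count(s: str) -> int:
--     words = ''.join(c if c.isalpha() else ' ' for c in s).split()
--     return sum(1 for w in words if w[-1].lower() in ('s', 'r'))
-- ===== Notes on version B (the rewrite author's own statement) =====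
-- stated objective: idiomatic
-- what changed: B first segments the string into whole words (non-letters become spaces, then split) and counts words whose final letter lowercases to 's' or 'r', instead of A's inline scan that tracks the previous character and detects word boundaries plus a trailing end-of-string check.
import Mathlib
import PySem

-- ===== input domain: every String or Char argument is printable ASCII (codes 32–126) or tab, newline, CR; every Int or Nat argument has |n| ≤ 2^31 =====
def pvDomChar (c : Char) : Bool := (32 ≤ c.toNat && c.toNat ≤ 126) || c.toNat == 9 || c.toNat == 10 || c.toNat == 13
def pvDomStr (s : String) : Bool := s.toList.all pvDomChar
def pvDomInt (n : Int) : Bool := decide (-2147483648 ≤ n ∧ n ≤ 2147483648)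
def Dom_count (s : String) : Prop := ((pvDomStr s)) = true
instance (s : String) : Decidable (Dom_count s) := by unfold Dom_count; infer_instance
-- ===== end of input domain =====

-- B segments the string into whole words up front (non-letters → spaces, then split) instead of
-- A's inline previous-character scan; objective: more idiomatic, same O(n) cost.

-- ===== PORT A =====
-- loop body of A's 'for char in s' (state = (words, last))
def pvStepA (st : Int × Char) (c : Char) : Int × Char :=
  (if !(PySem.Chars.isalpha c) &&
      (PySem.Chars.lowerChar st.2 == 's' || PySem.Chars.lowerChar st.2 == 'r')
   then st.1 + 1 else st.1, c)

def count (s : String) : Int :=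
  let r := s.toList.foldl pvStepA (0, ' ')
  if PySem.Chars.lowerChar r.2 == 'r' || PySem.Chars.lowerChar r.2 == 's' then r.1 + 1 else r.1

-- ===== PORT B =====
-- B's per-word test: w[-1].lower() in ('s', 'r')
def pvEndsSR (w : List Char) : Bool :=
  PySem.Chars.lowerChar (PySem.List.pyGetD w (-1) ' ') == 's' ||
  PySem.Chars.lowerChar (PySem.List.pyGetD w (-1) ' ') == 'r'

def count_alt (s : String) : Int :=
  let words := PySem.Chars.split₀
    (s.toList.map (fun c => if PySem.Chars.isalpha c then c else ' '))
  ((words.countP pvEndsSR : Nat) : Int)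

-- ===== PRECONDITION & SPEC =====
def Spec_count (s : String) (out : Int) : Prop := out = count_alt s
instance (s : String) (out : Int) : Decidable (Spec_count s out) := by unfold Spec_count; infer_instance

-- ===== CLAIM (what is proved, stated in full; the proofs are below) =====
def Claim_equal_count : Prop := ∀ (s : String), Dom_count s → Spec_count s (count s)

-- ===== LEMMAS AND PROOFS =====

-- a character lowercasing to 's' or 'r' is a letter
lemma pv_good_alpha (c : Char)
    (h : (PySem.Chars.lowerChar c == 's' || PySem.Chars.lowerChar c == 'r') = true) :
    PySem.Chars.isalpha c = true := by
  simp only [PySem.Chars.lowerChar, PySem.Chars.isupper, PySem.Chars.isalpha,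
    PySem.Chars.islower] at *
  split_ifs at h with hu
  · simp_all
  · rcases Bool.or_eq_true_iff.mp h with h' | h' <;>
      simp_all [Char.ext_iff, Char.le_def]

-- a letter is not whitespace
lemma pv_alpha_not_space (c : Char) (h : PySem.Chars.isalpha c = true) :
    PySem.Chars.isspace c = false := by
  simp [PySem.Chars.isalpha, PySem.Chars.isupper, PySem.Chars.islower, Char.le_def,
    UInt32.le_iff_toNat_le] at h
  simp [PySem.Chars.isspace]
  omega

-- B's test on a word ending in q is A's test on q
lemma pv_endsSR_last (t : List Char) (q : Char) :
    pvEndsSR (t ++ [q]) =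
      (PySem.Chars.lowerChar q == 's' || PySem.Chars.lowerChar q == 'r') := by
  have : PySem.List.pyGetD (t ++ [q]) (-1) ' ' = q := by
    simp [PySem.List.pyGetD, PySem.List.pyGet?, PySem.List.pyIdx?]
  simp [pvEndsSR, this]

-- main loop invariant: A's scan from state (n, p), with its end-of-string bonus, plus the
-- words already closed (acc) equals B's word count over the remaining characters
lemma pv_main (l : List Char) (n : Int) (p : Char) (cur : List Char)
    (acc : List (List Char))
    (hinv : cur.head? = if PySem.Chars.isalpha p then some p else none) :
    (if (PySem.Chars.lowerChar (l.foldl pvStepA (n, p)).2 == 'r' ||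
         PySem.Chars.lowerChar (l.foldl pvStepA (n, p)).2 == 's') = true
     then (l.foldl pvStepA (n, p)).1 + 1 else (l.foldl pvStepA (n, p)).1)
      + (acc.countP pvEndsSR : Int)
    = n + ((PySem.Chars.split₀.go
        (l.map (fun c => if PySem.Chars.isalpha c then c else ' ')) cur acc).countP
          pvEndsSR : Int) := by
  induction l generalizing n p cur acc with
  | nil =>
    simp only [List.foldl_nil, List.map_nil, PySem.Chars.split₀.go]
    by_cases hg : (PySem.Chars.lowerChar p == 's' || PySem.Chars.lowerChar p == 'r') = true
    · have ha := pv_good_alpha p hg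
      rcases cur with _ | ⟨q, t⟩
      · simp [ha] at hinv
      · have hq : q = p := by simpa [ha] using hinv
        have h1 : (PySem.Chars.lowerChar p == 'r' || PySem.Chars.lowerChar p == 's') = true := by
          rcases Bool.or_eq_true_iff.mp hg with h | h <;> simp [h]
        have hcount : List.countP pvEndsSR (((q :: t).reverse :: acc).reverse)
            = acc.countP pvEndsSR + 1 := by
          simp [List.countP_append, List.reverse_cons, pv_endsSR_last, hq, hg]
        rw [if_pos h1, if_neg (by simp), hcount]
        push_cast; ring
    · have hg2 := Bool.or_eq_false_iff.mp (Bool.eq_false_iff.mpr hg)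
      have h1 : (PySem.Chars.lowerChar p == 'r' || PySem.Chars.lowerChar p == 's') = false := by
        simp [hg2.1, hg2.2]
      rw [if_neg (by simp [h1])]
      rcases cur with _ | ⟨q, t⟩
      · simp
      · have ha : PySem.Chars.isalpha p = true := by
          by_contra hna
          simp [Bool.eq_false_iff.mpr hna] at hinv
        have hq : q = p := by simpa [ha] using hinv
        have hcount : List.countP pvEndsSR (((q :: t).reverse :: acc).reverse)
            = acc.countP pvEndsSR := by
          simp [List.countP_append, List.reverse_cons, pv_endsSR_last, hq,
            Bool.eq_false_iff.mpr hg]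
        rw [if_neg (by simp), hcount]
  | cons c rest ih =>
    simp only [List.foldl_cons, List.map_cons]
    by_cases hc : PySem.Chars.isalpha c = true
    · have hns := pv_alpha_not_space c hc
      have hstep : pvStepA (n, p) c = (n, c) := by simp [pvStepA, hc]
      have hrepl : (if PySem.Chars.isalpha c = true then c else ' ') = c := by simp [hc]
      have hgo : PySem.Chars.split₀.go
          (c :: rest.map (fun c => if PySem.Chars.isalpha c = true then c else ' ')) cur acc
          = PySem.Chars.split₀.go
            (rest.map (fun c => if PySem.Chars.isalpha c = true then c else ' '))
            (c :: cur) acc := by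
        simp [PySem.Chars.split₀.go, hns]
      rw [hstep, hrepl, hgo]
      exact ih n c (c :: cur) acc (by simp [hc])
    · have hc' : PySem.Chars.isalpha c = false := Bool.eq_false_iff.mpr hc
      have hrepl : (if PySem.Chars.isalpha c = true then c else ' ') = ' ' := by simp [hc']
      have hsp : PySem.Chars.isspace ' ' = true := by decide
      rw [hrepl]
      rcases cur with _ | ⟨q, t⟩
      · have hp : PySem.Chars.isalpha p = false := by
          by_contra h
          rw [Bool.not_eq_false] at h
          simp [h] at hinv
        have hg : (PySem.Chars.lowerChar p == 's' || PySem.Chars.lowerChar p == 'r') = false := by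
          by_contra h
          rw [Bool.not_eq_false] at h
          rw [pv_good_alpha p h] at hp
          simp at hp
        have hstep : pvStepA (n, p) c = (n, c) := by simp [pvStepA, hg]
        have hgo : PySem.Chars.split₀.go
            (' ' :: rest.map (fun c => if PySem.Chars.isalpha c = true then c else ' ')) [] acc
            = PySem.Chars.split₀.go
              (rest.map (fun c => if PySem.Chars.isalpha c = true then c else ' ')) [] acc := by
          simp [PySem.Chars.split₀.go, hsp]
        rw [hstep, hgo]
        exact ih n c [] acc (by simp [hc'])
      · have ha : PySem.Chars.isalpha p = true := by
          by_contra hna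
          simp [Bool.eq_false_iff.mpr hna] at hinv
        have hq : q = p := by simpa [ha] using hinv
        have hgo : PySem.Chars.split₀.go
            (' ' :: rest.map (fun c => if PySem.Chars.isalpha c = true then c else ' '))
            (q :: t) acc
            = PySem.Chars.split₀.go
              (rest.map (fun c => if PySem.Chars.isalpha c = true then c else ' ')) []
              ((q :: t).reverse :: acc) := by
          simp [PySem.Chars.split₀.go, hsp]
        rw [hgo]
        by_cases hg : (PySem.Chars.lowerChar p == 's' || PySem.Chars.lowerChar p == 'r') = true
        · have hstep : pvStepA (n, p) c = (n + 1, c) := by simp [pvStepA, hc', hg]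
          rw [hstep]
          have := ih (n + 1) c [] ((q :: t).reverse :: acc) (by simp [hc'])
          rw [List.countP_cons, List.reverse_cons, pv_endsSR_last, hq, hg] at this
          rw [List.reverse_cons, hq]
          simp only [reduceIte] at this
          push_cast at this ⊢
          omega
        · have hg' := Bool.eq_false_iff.mpr hg
          have hstep : pvStepA (n, p) c = (n, c) := by simp [pvStepA, hg']
          rw [hstep]
          have := ih n c [] ((q :: t).reverse :: acc) (by simp [hc'])
          rw [List.countP_cons, List.reverse_cons, pv_endsSR_last, hq, hg'] at this
          rw [List.reverse_cons, hq]
          simp only [Bool.false_eq_true, reduceIte] at this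
          push_cast at this ⊢
          omega

-- ===== VERDICT (by name: the statement is the Claim_ definition above) =====
theorem count_spec : Claim_equal_count := by
  intro s _
  unfold Spec_count count count_alt PySem.Chars.split₀
  have h := pv_main s.toList 0 ' ' [] [] (by decide)
  simp only [List.countP_nil, Nat.cast_zero, add_zero, zero_add] at h
  exact h
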